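-- pv_equiv track=rewrite | github.com/J-ally/Conway-suite | Conway_suite.py | cut_list
-- ===== SOURCE A (Python) =====
-- def cut_list (n) :
--     """
--     take  a list as argument and cut it in chunks of the same number
--     ex : [1,1,3,3,3] returns [ [1,1],[3,3,3] ]
--     """
--     L = []
--     index = 0
--     for i in range (len (n)-1) :
--         if n[i] != n[i+1] :
--             L.append (n[index:i+1])
--             index = i+1
--     L.append (n[index :])      #adds the remaining part of the list
--     return L
-- ===== SOURCE B (Python) =====
-- def cut_list(n):
--     """
--     take  a list as argument and cut it in chunks of the same number
--     ex : [1,1,3,3,3] returns [ [1,1],[3,3,3] ]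
--     """
--     L = []
--     cur = []
--     for x in n:
--         if cur and x != cur[-1]:
--             L.append(cur)
--             cur = []
--         cur.append(x)
--     L.append(cur)
--     return L
-- ===== Notes on version B (the rewrite author's own statement) =====
-- stated objective: alternative
-- what changed: B builds each run element-by-element with an accumulator chunk (flush on change of value) instead of tracking a run-start index and slicing the input at each boundary.
import Mathlib
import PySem

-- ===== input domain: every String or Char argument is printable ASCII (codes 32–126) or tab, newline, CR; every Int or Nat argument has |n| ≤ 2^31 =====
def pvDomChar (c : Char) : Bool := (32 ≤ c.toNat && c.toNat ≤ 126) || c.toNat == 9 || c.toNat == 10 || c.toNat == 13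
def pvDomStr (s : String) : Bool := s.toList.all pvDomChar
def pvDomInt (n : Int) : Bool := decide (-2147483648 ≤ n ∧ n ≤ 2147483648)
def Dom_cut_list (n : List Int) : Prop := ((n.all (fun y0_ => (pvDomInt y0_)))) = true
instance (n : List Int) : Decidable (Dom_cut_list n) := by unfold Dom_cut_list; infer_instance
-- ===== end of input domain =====

-- B splits the list into runs by accumulating the current chunk element-by-element (flushed when the
-- value changes) instead of A's run-start index plus slicing; same values, alternative decomposition.

-- ===== PORT A =====
-- A's loop body: for i in range(len(n)-1): if n[i] != n[i+1]: L.append(n[index:i+1]); index = i+1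
def cutStepA (n : List Int) (st : List (List Int) × Int) (i : Int) : List (List Int) × Int :=
  if PySem.List.pyGetD n i 0 ≠ PySem.List.pyGetD n (i + 1) 0 then
    (st.1 ++ [PySem.List.slice n (some st.2) (some (i + 1))], i + 1)
  else st

def cut_list (n : List Int) : List (List Int) :=
  let st := (PySem.List.pyRange 0 ((n.length : Int) - 1) 1).foldl (cutStepA n) ([], 0)
  st.1 ++ [PySem.List.slice n (some st.2) none]

-- ===== PORT B =====
-- B's loop body: if cur and x != cur[-1]: L.append(cur); cur = []   then cur.append(x)
def cutStepB (st : List (List Int) × List Int) (x : Int) : List (List Int) × List Int :=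
  if st.2 ≠ [] ∧ x ≠ PySem.List.pyGetD st.2 (-1) 0 then
    (st.1 ++ [st.2], ([] : List Int) ++ [x])
  else (st.1, st.2 ++ [x])

def cut_list_alt (n : List Int) : List (List Int) :=
  let st := n.foldl cutStepB ([], [])
  st.1 ++ [st.2]

-- ===== PRECONDITION & SPEC =====
def Spec_cut_list (n : List Int) (out : List (List Int)) : Prop := out = cut_list_alt n
instance (n : List Int) (out : List (List Int)) : Decidable (Spec_cut_list n out) := by unfold Spec_cut_list; infer_instance

-- ===== CLAIM (what is proved, stated in full; the proofs are below) =====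
def Claim_equal_cut_list : Prop := ∀ (n : List Int), Dom_cut_list n → Spec_cut_list n (cut_list n)

-- ===== LEMMAS AND PROOFS =====

lemma getD_app (m : List Int) (x : Int) (j : Int) (h0 : 0 ≤ j) (h : j < (m.length:Int)) :
    PySem.List.pyGetD (m++[x]) j (0:Int) = PySem.List.pyGetD m j 0 := by
  rw [PySem.List.pyGetD_eq_getElem _ _ h0 (by simp; omega),
      PySem.List.pyGetD_eq_getElem _ _ h0 h]
  exact List.getElem_append_left (by omega)

lemma slice_app (m : List Int) (x : Int) {a b : Int} (h0 : 0 ≤ a) (h1 : 0 ≤ b) (ha : a.toNat ≤ m.length) (hb : b.toNat ≤ m.length) :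
    PySem.List.slice (m++[x]) (some a) (some b) = PySem.List.slice m (some a) (some b) := by
  rw [PySem.List.slice_toNat _ h0 h1, PySem.List.slice_toNat _ h0 h1,
      List.drop_append_of_le_length ha, List.take_append_of_le_length (by simp; omega)]

lemma cutStepA_fold_append (m : List Int) (x : Int) :
    ∀ (k : Nat) (j : Int) (st : List (List Int) × Int), 0 ≤ st.2 → st.2 ≤ j →
      ((m.length : Int) - 1 - j).toNat = k →
      (PySem.List.pyRange j ((m.length : Int) - 1) 1).foldl (cutStepA (m ++ [x])) st
        = (PySem.List.pyRange j ((m.length : Int) - 1) 1).foldl (cutStepA m) st := by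
  intro k
  induction k with
  | zero =>
    intro j st _ _ hk
    rw [PySem.List.pyRange_one_eq_nil (by omega)]
    rfl
  | succ k ih =>
    intro j st h0 hj hk
    have hjlt : j < (m.length : Int) - 1 := by omega
    rw [PySem.List.pyRange_one_cons hjlt, List.foldl_cons, List.foldl_cons]
    have hstep : cutStepA (m ++ [x]) st j = cutStepA m st j := by
      unfold cutStepA
      rw [getD_app m x j (by omega) (by omega), getD_app m x (j+1) (by omega) (by omega),
          slice_app m x h0 (by omega) (by omega) (by omega)]
    have hc : (cutStepA m st j).2 = j + 1 ∨ (cutStepA m st j).2 = st.2 := by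
      unfold cutStepA; split <;> simp
    rw [hstep]
    exact ih (j+1) (cutStepA m st j) (by omega) (by omega) (by omega)

lemma cut_states (m : List Int) :
    (((PySem.List.pyRange 0 ((m.length : Int) - 1) 1).foldl (cutStepA m) ([], 0)).1
        = (m.foldl cutStepB ([], [])).1)
    ∧ (m.foldl cutStepB ([], [])).2
        = m.drop ((PySem.List.pyRange 0 ((m.length : Int) - 1) 1).foldl (cutStepA m) ([], 0)).2.toNat
    ∧ 0 ≤ ((PySem.List.pyRange 0 ((m.length : Int) - 1) 1).foldl (cutStepA m) ([], 0)).2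
    ∧ ((PySem.List.pyRange 0 ((m.length : Int) - 1) 1).foldl (cutStepA m) ([], 0)).2
        ≤ max 0 ((m.length : Int) - 1) := by
  induction m using List.reverseRecOn with
  | nil =>
    rw [PySem.List.pyRange_one_eq_nil (by simp)]
    simp
  | append_singleton m x ih =>
    by_cases hm : m = []
    · subst hm
      rw [PySem.List.pyRange_one_eq_nil (by simp)]
      simp [cutStepB]
    · have hm1 : 1 ≤ m.length := List.length_pos_iff.mpr hm
      obtain ⟨ih1, ih2, ih3, ih4⟩ := ih
      rw [max_eq_right (by omega : (0:Int) ≤ (m.length:Int) - 1)] at ih4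
      have hsplit : PySem.List.pyRange 0 ((((m ++ [x]).length :Int)) - 1)
          = PySem.List.pyRange 0 ((m.length : Int) - 1) ++ [(m.length : Int) - 1] := by
        have e : (((m ++ [x]).length : Int) - 1) = ((m.length : Int) - 1) + 1 := by
          simp
        rw [e, PySem.List.pyRange_one_succ_right (by omega)]
      rw [hsplit, List.foldl_append,
          cutStepA_fold_append m x _ 0 ([], 0) (by simp) (by simp) rfl,
          List.foldl_append]
      set p := (PySem.List.pyRange 0 ((m.length : Int) - 1)).foldl (cutStepA m) ([], 0) with hp
      set q := m.foldl cutStepB ([], []) with hq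
      have hk : p.2.toNat ≤ m.length - 1 := by omega
      have f3 : q.2 ≠ [] := by
        rw [ih2]
        simp [List.drop_eq_nil_iff]
        omega
      have f1 : PySem.List.pyGetD (m ++ [x]) ((m.length : Int) - 1) 0 = m.getLast hm := by
        rw [getD_app m x _ (by omega) (by omega),
            PySem.List.pyGetD_eq_getElem _ _ (by omega) (by omega),
            List.getLast_eq_getElem]
        congr 1
        omega
      have f2 : PySem.List.pyGetD (m ++ [x]) ((m.length : Int) - 1 + 1) 0 = x := by
        rw [PySem.List.pyGetD_eq_getElem _ _ (by omega) (by simp)]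
        simp
      have f4 : PySem.List.pyGetD q.2 (-1) 0 = m.getLast hm := by
        rw [PySem.List.pyGetD_neg_one _ _ f3, List.getLast_eq_getElem, List.getLast_eq_getElem]
        simp only [ih2, List.getElem_drop, List.length_drop]
        congr 1
        omega
      by_cases hx : x = m.getLast hm
      · -- no boundary: A keeps its state, B extends the current chunk
        rw [List.foldl_cons, List.foldl_nil, List.foldl_cons, List.foldl_nil]
        have hA : cutStepA (m ++ [x]) p ((m.length : Int) - 1) = p := by
          unfold cutStepA
          rw [f1, f2, if_neg (by simp [hx])]
        have hB : cutStepB q x = (q.1, q.2 ++ [x]) := by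
          unfold cutStepB
          rw [if_neg (by simp [f4, hx])]
        rw [hA, hB]
        refine ⟨ih1, ?_, ih3, by simp; omega⟩
        rw [List.drop_append_of_le_length (by omega), ih2]
      · -- boundary: A flushes a slice equal to B's current chunk
        rw [List.foldl_cons, List.foldl_nil, List.foldl_cons, List.foldl_nil]
        have f5 : PySem.List.slice (m ++ [x]) (some p.2) (some ((m.length : Int) - 1 + 1))
            = m.drop p.2.toNat := by
          rw [PySem.List.slice_toNat _ ih3 (by omega),
              List.drop_append_of_le_length (by omega),
              List.take_append_of_le_length (by simp),
              List.take_of_length_le (by simp)]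
        have hA : cutStepA (m ++ [x]) p ((m.length : Int) - 1)
            = (p.1 ++ [m.drop p.2.toNat], (m.length : Int) - 1 + 1) := by
          unfold cutStepA
          rw [f1, f2, f5, if_pos (by simp; exact fun h => absurd h.symm hx)]
        have hB : cutStepB q x = (q.1 ++ [q.2], ([] : List Int) ++ [x]) := by
          unfold cutStepB
          rw [if_pos ⟨f3, by rw [f4]; exact hx⟩]
        rw [hA, hB]
        refine ⟨by rw [ih1, ih2], ?_, by omega, by simp⟩
        have e2 : ((m.length : Int) - 1 + 1).toNat = m.length := by omega
        rw [e2]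
        simp

-- ===== VERDICT (by name: the statement is the Claim_ definition above) =====
theorem cut_list_spec : Claim_equal_cut_list := by
  intro n _
  unfold Spec_cut_list cut_list cut_list_alt
  obtain ⟨h1, h2, h3, _⟩ := cut_states n
  simp only []
  rw [PySem.List.slice_from _ h3, h1, ← h2]
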